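-- pv_equiv track=rewrite | github.com/FUMTech/MSExplorer | test.py | count_co_changes
-- ===== SOURCE A (Python) =====
-- from itertools import combinations
-- from itertools import combinations
-- from itertools import combinations
--
-- def count_co_changes(commit_history):
--     co_change_count = {}
--
--     for classes in commit_history.values():
--         for class1, class2 in combinations(classes, 2):
--             if (class1.lower(), class2.lower()) not in co_change_count:
--                 co_change_count[(class1.lower(), class2.lower())] = 0
--             co_change_count[(class1.lower(), class2.lower())] += 1
--
--             if (class2.lower(), class1.lower()) not in co_change_count:
--                 co_change_count[(class2.lower(), class1.lower())] = 0
--             co_change_count[(class2.lower(), class1.lower())] += 1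
--
--     return co_change_count
-- ===== SOURCE B (Python) =====
-- def count_co_changes(commit_history):
--     pairs = []
--     for classes in commit_history.values():
--         low = [c.lower() for c in classes]
--         while low:
--             a = low.pop(0)
--             for b in low:
--                 pairs.append((a, b))
--                 pairs.append((b, a))
--     counts = {}
--     for k in pairs:
--         counts[k] = counts.get(k, 0) + 1
--     return counts
-- ===== Notes on version B (the rewrite author's own statement) =====
-- stated objective: simpler
-- what changed: A mutates a dict in place inside the pair loop with membership checks, zero-inits and two separate increment blocks per unordered pair; B first materialises the flat stream of lowered ordered co-change pairs per commit (head-vs-rest loop, both orientations emitted once) and then tallies that stream in a single dict.get pass.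
import Mathlib
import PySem

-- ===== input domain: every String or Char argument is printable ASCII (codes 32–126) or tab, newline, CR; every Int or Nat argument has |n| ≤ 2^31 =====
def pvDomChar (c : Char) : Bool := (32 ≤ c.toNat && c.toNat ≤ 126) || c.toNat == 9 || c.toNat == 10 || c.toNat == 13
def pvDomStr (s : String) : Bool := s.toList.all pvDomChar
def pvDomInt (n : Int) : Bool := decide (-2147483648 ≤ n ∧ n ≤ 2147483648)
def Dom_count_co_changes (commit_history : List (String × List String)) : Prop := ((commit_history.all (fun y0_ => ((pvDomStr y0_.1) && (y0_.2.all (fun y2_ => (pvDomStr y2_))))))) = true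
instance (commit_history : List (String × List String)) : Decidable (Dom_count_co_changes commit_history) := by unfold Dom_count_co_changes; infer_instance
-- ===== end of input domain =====

-- B replaces A's in-place dict bookkeeping (membership check, zero-init, two increments per
-- unordered pair) by a two-phase decomposition: first materialise the stream of lowered ordered
-- pairs (head-vs-rest recursion per commit), then tallies that stream once with dict.get;
-- objective: simpler.

-- ===== PORT A =====
def count_co_changes (commit_history : List (String × List String)) : List (String × String × Int) :=
  let d := commit_history.foldl (fun d c =>
    (PySem.List.combinations c.2 2).foldl (fun d p =>
      match p with
      | [class1, class2] =>
        let k1 := (PySem.Str.lower class1, PySem.Str.lower class2)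
        let k2 := (PySem.Str.lower class2, PySem.Str.lower class1)
        let d := if d.contains k1 then d else d.insert k1 (0 : Int)
        let d := d.insert k1 (d.getD k1 0 + 1)
        let d := if d.contains k2 then d else d.insert k2 (0 : Int)
        d.insert k2 (d.getD k2 0 + 1)
      | _ => d) d) PySem.Dict.empty
  d.items.map (fun kv => (kv.1.1, kv.1.2, kv.2))

-- ===== PORT B =====
-- the 'while low: a = low.pop(0); for b in low: append both orders' loop of Source B
def pvPairsOfLow (low : List String) (pairs : List (String × String)) : List (String × String) :=
  match low with
  | [] => pairs
  | a :: rest => pvPairsOfLow rest (rest.foldl (fun acc b => acc ++ [(a, b)] ++ [(b, a)]) pairs)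

def count_co_changes_alt (commit_history : List (String × List String)) : List (String × String × Int) :=
  let pairs := commit_history.foldl (fun pairs c =>
    pvPairsOfLow (c.2.map (fun s => PySem.Str.lower s)) pairs) []
  let counts := pairs.foldl (fun counts k => counts.insert k (counts.getD k 0 + 1)) PySem.Dict.empty
  counts.items.map (fun kv => (kv.1.1, kv.1.2, kv.2))

-- ===== PRECONDITION & SPEC =====
def Spec_count_co_changes (commit_history : List (String × List String)) (out : List (String × String × Int)) : Prop := out = count_co_changes_alt commit_history
instance (commit_history : List (String × List String)) (out : List (String × String × Int)) : Decidable (Spec_count_co_changes commit_history out) := by unfold Spec_count_co_changes; infer_instance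

-- ===== CLAIM (what is proved, stated in full; the proofs are below) =====
def Claim_equal_count_co_changes : Prop := ∀ (commit_history : List (String × List String)), Dom_count_co_changes commit_history → Spec_count_co_changes commit_history (count_co_changes commit_history)

-- ===== LEMMAS AND PROOFS =====

-- the flat stream of lowered ordered pairs contributed by one commit (specification vehicle)
def pvPairFlat (low : List String) : List (String × String) :=
  match low with
  | [] => []
  | a :: rest => rest.flatMap (fun b => [(a, b), (b, a)]) ++ pvPairFlat rest

-- A's guarded zero-init + increment at key k is collections.Counter's modify step
theorem pv_bump_eq_modify (d : PySem.Dict (String × String) Int) (k : String × String) :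
    (let d' := if d.contains k then d else d.insert k (0 : Int)
     d'.insert k (d'.getD k 0 + 1)) = d.modify k 0 (· + 1) := by
  by_cases h : d.contains k = true
  · simp [h, PySem.Dict.modify]
  · simp only [Bool.not_eq_true] at h
    simp [h, PySem.Dict.modify, PySem.Dict.getD_insert_self, PySem.Dict.insert_insert_self,
      PySem.Dict.getD_of_not_contains (h := h)]

theorem pv_foldl_flatMap {α β γ : Type} (l : List α) (g : α → List β)
    (f : γ → β → γ) (init : γ) :
    (l.flatMap g).foldl f init = l.foldl (fun acc x => (g x).foldl f acc) init := by
  induction l generalizing init with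
  | nil => rfl
  | cons x t ih => simp [List.flatMap_cons, List.foldl_append, ih]


def pvGmatch (p : List String) : List (String × String) :=
  match p with
  | [c1, c2] => [(PySem.Str.lower c1, PySem.Str.lower c2), (PySem.Str.lower c2, PySem.Str.lower c1)]
  | _ => []

theorem pv_gflat (classes : List String) :
    (PySem.List.combinations classes 2).flatMap pvGmatch = pvPairFlat (classes.map PySem.Str.lower) := by
  induction classes with
  | nil =>
    simp [PySem.List.combinations_nil_succ, pvPairFlat]
  | cons x xs ih =>
    simp [PySem.List.combinations_cons_succ, PySem.List.combinations_one,
      List.flatMap_append, List.flatMap_map, pvPairFlat, pvGmatch, ih, Function.comp]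

-- A's inner loop over combinations(classes, 2) is the Counter fold over the commit's pair stream
theorem pv_inner_eq (classes : List String) (d : PySem.Dict (String × String) Int) :
    (PySem.List.combinations classes 2).foldl (fun d p =>
      match p with
      | [class1, class2] =>
        let k1 := (PySem.Str.lower class1, PySem.Str.lower class2)
        let k2 := (PySem.Str.lower class2, PySem.Str.lower class1)
        let d := if d.contains k1 then d else d.insert k1 (0 : Int)
        let d := d.insert k1 (d.getD k1 0 + 1)
        let d := if d.contains k2 then d else d.insert k2 (0 : Int)
        d.insert k2 (d.getD k2 0 + 1)
      | _ => d) d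
    = (pvPairFlat (classes.map PySem.Str.lower)).foldl (fun d k => d.modify k 0 (· + 1)) d := by
  have hstep : ∀ (d : PySem.Dict (String × String) Int) (p : List String),
      p ∈ PySem.List.combinations classes 2 →
      (match p with
      | [class1, class2] =>
        let k1 := (PySem.Str.lower class1, PySem.Str.lower class2)
        let k2 := (PySem.Str.lower class2, PySem.Str.lower class1)
        let d := if d.contains k1 then d else d.insert k1 (0 : Int)
        let d := d.insert k1 (d.getD k1 0 + 1)
        let d := if d.contains k2 then d else d.insert k2 (0 : Int)
        d.insert k2 (d.getD k2 0 + 1)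
      | _ => d)
      = (pvGmatch p).foldl (fun d k => d.modify k 0 (· + 1)) d := by
    intro d p _
    match p with
    | [] => rfl
    | [_] => rfl
    | [c1, c2] =>
      simp only [pvGmatch, List.foldl_cons, List.foldl_nil]
      rw [← pv_bump_eq_modify, ← pv_bump_eq_modify]
    | _ :: _ :: _ :: _ => rfl
  have h1 := PySem.List.foldl_congr_mem
    (l := PySem.List.combinations classes 2) (init := d)
    (f := fun d p =>
      match p with
      | [class1, class2] =>
        let k1 := (PySem.Str.lower class1, PySem.Str.lower class2)
        let k2 := (PySem.Str.lower class2, PySem.Str.lower class1)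
        let d := if d.contains k1 then d else d.insert k1 (0 : Int)
        let d := d.insert k1 (d.getD k1 0 + 1)
        let d := if d.contains k2 then d else d.insert k2 (0 : Int)
        d.insert k2 (d.getD k2 0 + 1)
      | _ => d)
    (g := fun d p => (pvGmatch p).foldl (fun d k => d.modify k 0 (· + 1)) d)
    (fun acc x hx => hstep acc x hx)
  rw [h1, ← pv_foldl_flatMap, pv_gflat]

-- B's per-commit accumulation appends exactly the commit's pair stream
theorem pv_pairsOfLow_eq (low : List String) (pairs : List (String × String)) :
    pvPairsOfLow low pairs = pairs ++ pvPairFlat low := by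
  induction low generalizing pairs with
  | nil => simp [pvPairsOfLow, pvPairFlat]
  | cons a rest ih =>
    have h : rest.foldl (fun acc b => acc ++ [(a, b)] ++ [(b, a)]) pairs
        = pairs ++ rest.flatMap (fun b => [(a, b), (b, a)]) := by
      have := PySem.List.foldl_append_eq_flatMap (l := rest)
        (g := fun b => [(a, b), (b, a)]) (acc := pairs)
      simpa [List.append_assoc] using this
    simp [pvPairsOfLow, ih, pvPairFlat, List.flatMap]

-- ===== VERDICT (by name: the statement is the Claim_ definition above) =====
theorem count_co_changes_spec : Claim_equal_count_co_changes := by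
  intro commit_history _
  unfold Spec_count_co_changes count_co_changes count_co_changes_alt
  have hpairs : commit_history.foldl (fun pairs c =>
      pvPairsOfLow (c.2.map (fun s => PySem.Str.lower s)) pairs) []
      = commit_history.flatMap (fun c => pvPairFlat (c.2.map PySem.Str.lower)) := by
    have h1 : commit_history.foldl (fun pairs c =>
        pvPairsOfLow (c.2.map (fun s => PySem.Str.lower s)) pairs) []
        = commit_history.foldl (fun pairs c =>
            pairs ++ pvPairFlat (c.2.map PySem.Str.lower)) [] := by
      apply PySem.List.foldl_congr_mem
      intro acc c _
      simpa using pv_pairsOfLow_eq (c.2.map PySem.Str.lower) acc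
    rw [h1]
    simpa using PySem.List.foldl_append_eq_flatMap
      (l := commit_history) (g := fun c => pvPairFlat (c.2.map PySem.Str.lower)) (acc := [])
  have hd : commit_history.foldl (fun d c =>
      (PySem.List.combinations c.2 2).foldl (fun d p =>
        match p with
        | [class1, class2] =>
          let k1 := (PySem.Str.lower class1, PySem.Str.lower class2)
          let k2 := (PySem.Str.lower class2, PySem.Str.lower class1)
          let d := if d.contains k1 then d else d.insert k1 (0 : Int)
          let d := d.insert k1 (d.getD k1 0 + 1)
          let d := if d.contains k2 then d else d.insert k2 (0 : Int)
          d.insert k2 (d.getD k2 0 + 1)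
        | _ => d) d) PySem.Dict.empty
      = PySem.Dict.counter
          (commit_history.flatMap (fun c => pvPairFlat (c.2.map PySem.Str.lower))) := by
    rw [PySem.Dict.counter_eq_foldl, pv_foldl_flatMap]
    apply PySem.List.foldl_congr_mem
    intro acc c _
    exact pv_inner_eq c.2 acc
  rw [hpairs, hd]
  simp only [PySem.Dict.foldl_insert_getD_add_one_eq_counter]
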